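-- pv_equiv track=rewrite | github.com/Woolly-at-EBI/eDNAAqua-Plan | source/analyse_environmental_info.py | create_year_bins
-- ===== SOURCE A (Python) =====
-- def create_year_bins(value):
--     """
--     trying to bin years in 5 year
--     :param value:
--     :return:
--     """
--     min=1950
--     max=2025
--     if isinstance(value, int):
--         if value <= min:
--             return str(min) + "-pre"
--         for x in range(min, max, 5):
--             # 2023 far more likely than min so could try reversing the order
--             # logger.info(value)
--             if value <= x:
--                return f"{str(x)}-{str(x+5)}"
--     return None
-- ===== SOURCE B (Python) =====
-- def create_year_bins(value):
--     if isinstance(value, int):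
--         if value <= 1950:
--             return "1950-pre"
--         x = ((value + 4) // 5) * 5
--         if x <= 2020:
--             return f"{x}-{x + 5}"
--     return None
-- ===== Notes on version B (the rewrite author's own statement) =====
-- stated objective: simpler
-- what changed: Replaced the linear first-match scan over the list of bin boundaries with closed-form ceiling arithmetic (round the year up to the next bin boundary) and a single cutoff test.
import Mathlib
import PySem

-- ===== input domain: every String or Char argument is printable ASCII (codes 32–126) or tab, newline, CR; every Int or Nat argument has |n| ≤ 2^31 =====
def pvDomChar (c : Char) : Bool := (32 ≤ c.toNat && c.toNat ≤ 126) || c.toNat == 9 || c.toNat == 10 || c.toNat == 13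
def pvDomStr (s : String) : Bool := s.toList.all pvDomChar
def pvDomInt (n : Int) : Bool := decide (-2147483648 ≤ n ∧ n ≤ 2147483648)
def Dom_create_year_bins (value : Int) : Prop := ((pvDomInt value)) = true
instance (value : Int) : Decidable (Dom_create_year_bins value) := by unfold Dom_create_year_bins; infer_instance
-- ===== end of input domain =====

-- B replaces A's scan over range(1950,2025,5) with closed-form ceiling arithmetic (objective: simpler).


-- ===== PORT A =====
-- A's for-loop with early return, over range(1950, 2025, 5)
def createYearBinsLoop (value : Int) : List Int → Option String
  | [] => none
  | x :: rest =>
      if value ≤ x then some (PySem.Int.toStr x ++ "-" ++ PySem.Int.toStr (x + 5))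
      else createYearBinsLoop value rest

def create_year_bins (value : Int) : Option String :=
  if value ≤ 1950 then some (PySem.Int.toStr 1950 ++ "-pre")
  else createYearBinsLoop value (PySem.List.pyRange 1950 2025 5)

-- ===== PORT B =====
def create_year_bins_alt (value : Int) : Option String :=
  if value ≤ 1950 then some "1950-pre"
  else
    let x := PySem.Int.floordiv (value + 4) 5 * 5
    if x ≤ 2020 then some (PySem.Int.toStr x ++ "-" ++ PySem.Int.toStr (x + 5))
    else none

-- ===== PRECONDITION & SPEC =====
def Spec_create_year_bins (value : Int) (out : Option String) : Prop := out = create_year_bins_alt value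
instance (value : Int) (out : Option String) : Decidable (Spec_create_year_bins value out) := by unfold Spec_create_year_bins; infer_instance

-- ===== CLAIM (what is proved, stated in full; the proofs are below) =====
def Claim_equal_create_year_bins : Prop := ∀ (value : Int), Dom_create_year_bins value → Spec_create_year_bins value (create_year_bins value)

-- ===== LEMMAS AND PROOFS =====
theorem createYearBinsLoop_none (value : Int) (l : List Int)
    (h : ∀ x ∈ l, x < value) : createYearBinsLoop value l = none := by
  induction l with
  | nil => rfl
  | cons x rest ih =>
      have hx := h x (List.mem_cons_self ..)
      simp [createYearBinsLoop, not_le.mpr hx]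
      exact ih fun y hy => h y (List.mem_cons_of_mem _ hy)

theorem pyRange_eval : PySem.List.pyRange 1950 2025 5 =
    [1950, 1955, 1960, 1965, 1970, 1975, 1980, 1985, 1990, 1995,
     2000, 2005, 2010, 2015, 2020] := by decide

-- ===== VERDICT (by name: the statement is the Claim_ definition above) =====
theorem create_year_bins_spec : Claim_equal_create_year_bins := by
  intro value _
  unfold Spec_create_year_bins
  by_cases h1 : value ≤ 1950
  · simp only [create_year_bins, create_year_bins_alt, if_pos h1]
    decide
  · by_cases h2 : value ≤ 2020
    · -- 1951 ≤ value ≤ 2020: finite check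
      interval_cases value <;> decide
    · -- value > 2020: both none
      have hA : create_year_bins value = none := by
        unfold create_year_bins
        rw [if_neg h1, pyRange_eval]
        exact createYearBinsLoop_none _ _ (by intro x hx; fin_cases hx <;> omega)
      have hB : create_year_bins_alt value = none := by
        unfold create_year_bins_alt
        rw [if_neg h1]
        have : ¬ PySem.Int.floordiv (value + 4) 5 * 5 ≤ 2020 := by
          have h405 : (405:Int) ≤ PySem.Int.floordiv (value + 4) 5 := by
            rw [PySem.Int.le_floordiv_iff_mul_le (by omega)]; omega
          omega
        rw [if_neg this]
      rw [hA, hB]
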